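-- pv_equiv track=rewrite | github.com/Mowtine/NB_NN_Classifier | Evaluation.py | SplitnStrat
-- ===== SOURCE A (Python) =====
-- def SplitnStrat(data, split):
--     splitData = [[] for i in range(split)]
--     yesData = []
--     noData = []
--     for value in data:
--         if value[-1] == "no":
--             noData.append(value)
--         else:
--             yesData.append(value)
--     while len(noData) + len(yesData) > 0:
--         for i in range(split):
--             if len(noData) + len(yesData) > 0:
--                 if len(noData) != 0:
--                     splitData[i].append(noData.pop())
--                 else:
--                     splitData[i].append(yesData.pop())
--             else:
--                 break
--     return splitData
-- ===== SOURCE B (Python) =====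
-- def SplitnStrat(data, split):
--     noData = [v for v in data if v[-1] == "no"]
--     yesData = [v for v in data if v[-1] != "no"]
--     combined = noData[::-1] + yesData[::-1]
--     return [combined[i::split] for i in range(split)]
-- ===== Notes on version B (the rewrite author's own statement) =====
-- stated objective: simpler
-- what changed: Replaces the nested while/for loop that destructively pops from the two partition lists with a prebuilt emission order (reversed no-rows then reversed yes-rows) distributed by strided slicing combined[i::split].
import Mathlib
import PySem

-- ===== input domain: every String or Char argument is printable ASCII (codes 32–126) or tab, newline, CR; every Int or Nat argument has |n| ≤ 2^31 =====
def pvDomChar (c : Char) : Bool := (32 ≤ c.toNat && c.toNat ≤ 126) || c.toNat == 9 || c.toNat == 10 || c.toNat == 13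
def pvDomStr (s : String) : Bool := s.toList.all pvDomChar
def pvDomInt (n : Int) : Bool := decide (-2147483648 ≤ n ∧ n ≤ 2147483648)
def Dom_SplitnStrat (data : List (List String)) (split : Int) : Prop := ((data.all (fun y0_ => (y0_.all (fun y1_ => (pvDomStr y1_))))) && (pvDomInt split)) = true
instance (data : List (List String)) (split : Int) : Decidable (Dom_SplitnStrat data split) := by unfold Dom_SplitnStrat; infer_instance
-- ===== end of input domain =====

-- B replaces A's nested while/for pop loop with one prebuilt emission order
-- (reversed no-rows ++ reversed yes-rows) distributed by strided slicing (objective: simpler).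

-- ===== PORT A =====
-- 'value[-1] == "no"'; Python raises IndexError on an empty row (excluded by Pre_),
-- the port's default there is irrelevant to the claim.
def pvIsNo (value : List String) : Bool := (PySem.List.pyGet? value (-1)).getD "" == "no"

-- the partition for-loop: appends each row to noData or yesData (state (noData, yesData))
def pvPartA (data : List (List String)) : List (List String) × List (List String) :=
  data.foldl (fun (st : List (List String) × List (List String)) value =>
    if pvIsNo value then (st.1 ++ [value], st.2) else (st.1, st.2 ++ [value])) ([], [])

-- the inner 'for i in range(split)': splitData has exactly split buckets, so walking the
-- bucket list is walking i = 0..split-1; each step pops from the end of noData (else yesData)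
-- and appends to bucket i; the 'else: break' leaves the remaining buckets untouched.
def pvForA : List (List (List String)) → List (List String) → List (List String) →
    List (List (List String)) × List (List String) × List (List String)
  | [], noData, yesData => ([], noData, yesData)
  | sd :: rest, noData, yesData =>
    if noData.length + yesData.length > 0 then
      if noData.length ≠ 0 then
        let x := noData.getLast?.getD []      -- noData.pop()
        let out := pvForA rest noData.dropLast yesData
        ((sd ++ [x]) :: out.1, out.2)
      else
        let x := yesData.getLast?.getD []     -- yesData.pop()
        let out := pvForA rest noData yesData.dropLast
        ((sd ++ [x]) :: out.1, out.2)
    else (sd :: rest, noData, yesData)        -- break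

-- the outer while loop; each pass with split ≥ 1 removes ≥ 1 element, so
-- fuel = len(noData) + len(yesData) suffices on Pre_ (A diverges on split ≤ 0 with data ≠ []).
def pvWhileA : Nat → List (List (List String)) → List (List String) → List (List String) →
    List (List (List String))
  | 0, sd, _, _ => sd
  | fuel + 1, sd, noData, yesData =>
    if noData.length + yesData.length > 0 then
      let out := pvForA sd noData yesData
      pvWhileA fuel out.1 out.2.1 out.2.2
    else sd

def SplitnStrat (data : List (List String)) (split : Int) : List (List (List String)) :=
  let splitData := List.replicate split.toNat ([] : List (List String))  -- [[] for i in range(split)]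
  let p := pvPartA data
  pvWhileA (p.2.length + p.1.length) splitData p.1 p.2

-- ===== PORT B =====
-- hand port of the slice combined[i::split] for natural i and step k = split ≥ 1
-- (exact there: every k-th element starting at index i); for split.toNat = 0 it is never applied.
def pvStride (k : Nat) : List (List String) → List (List String)
  | [] => []
  | x :: xs => x :: pvStride k (xs.drop (k - 1))
termination_by l => l.length
decreasing_by simp [List.length_drop]

def SplitnStrat_alt (data : List (List String)) (split : Int) : List (List (List String)) :=
  let noData := data.filter (fun v => pvIsNo v)
  let yesData := data.filter (fun v => !pvIsNo v)
  let combined := noData.reverse ++ yesData.reverse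
  (List.range split.toNat).map (fun i => pvStride split.toNat (combined.drop i))

-- ===== PRECONDITION & SPEC =====
-- Pre_ excludes exactly the inputs where Python A does not return: an empty row makes
-- value[-1] raise IndexError, and split ≤ 0 with data ≠ [] makes the while loop spin forever.
def Pre_SplitnStrat (data : List (List String)) (split : Int) : Prop :=
  (∀ v ∈ data, v ≠ []) ∧ (data ≠ [] → 1 ≤ split)
instance (data : List (List String)) (split : Int) : Decidable (Pre_SplitnStrat data split) := by
  unfold Pre_SplitnStrat; infer_instance

def pvWitness_SplitnStrat : List (List String) × Int :=
  ([["a", "no"], ["b", "yes"], ["c", "no"]], 2)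

def Spec_SplitnStrat (data : List (List String)) (split : Int) (out : List (List (List String))) : Prop := out = SplitnStrat_alt data split
instance (data : List (List String)) (split : Int) (out : List (List (List String))) : Decidable (Spec_SplitnStrat data split out) := by unfold Spec_SplitnStrat; infer_instance

-- ===== CLAIM (what is proved, stated in full; the proofs are below) =====
def Claim_equal_SplitnStrat : Prop := ∀ (data : List (List String)) (split : Int), Dom_SplitnStrat data split → Pre_SplitnStrat data split → Spec_SplitnStrat data split (SplitnStrat data split)

-- ===== LEMMAS AND PROOFS =====

-- one inner-for pass, restated on the emission order comb = noData.reverse ++ yesData.reverse: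
-- bucket j gains comb[j] (if present), the first sd.length elements of comb are consumed
def passC : List (List (List String)) → List (List String) → List (List (List String))
  | [], _ => []
  | s :: ss, [] => s :: ss
  | s :: ss, cb :: cs => (s ++ [cb]) :: passC ss cs

theorem pvPartA_spec (data : List (List String)) :
    ∀ no yes : List (List String),
      data.foldl (fun (st : List (List String) × List (List String)) value =>
        if pvIsNo value then (st.1 ++ [value], st.2) else (st.1, st.2 ++ [value])) (no, yes)
      = (no ++ data.filter (fun v => pvIsNo v), yes ++ data.filter (fun v => !pvIsNo v)) := by
  induction data with
  | nil => simp
  | cons v rest ih =>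
    intro no yes
    by_cases h : pvIsNo v = true <;> simp [h, ih]

theorem pvForA_spec : ∀ (sd : List (List (List String))) (no yes : List (List String)),
    (pvForA sd no yes).1 = passC sd (no.reverse ++ yes.reverse) ∧
    (pvForA sd no yes).2.1.reverse ++ (pvForA sd no yes).2.2.reverse
      = (no.reverse ++ yes.reverse).drop sd.length := by
  intro sd
  induction sd with
  | nil => intro no yes; simp [pvForA, passC]
  | cons s ss ih =>
    intro no yes
    by_cases htot : no.length + yes.length > 0
    · by_cases hno : no.length ≠ 0
      · obtain ⟨ys, y, hc⟩ : ∃ (ys : List (List String)) (y : List String), no = List.concat ys y := by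
          rcases List.eq_nil_or_concat no with h | h
          · simp [h] at hno
          · exact h
        rw [List.concat_eq_append] at hc
        subst hc
        have hih := ih ys yes
        simp [pvForA, passC, hih.1, hih.2]
      · have hyes : yes.length ≠ 0 := by omega
        obtain ⟨ys, y, hc⟩ : ∃ (ys : List (List String)) (y : List String), yes = List.concat ys y := by
          rcases List.eq_nil_or_concat yes with h | h
          · simp [h] at hyes
          · exact h
        rw [List.concat_eq_append] at hc
        subst hc
        have hno' : no = [] := by
          cases no with
          | nil => rfl
          | cons a as => simp at hno
        subst hno'
        have hih := ih [] ys
        simp [pvForA, passC, hih.1, hih.2]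
    · have hno : no = [] := List.length_eq_zero_iff.mp (by omega)
      have hyes : yes = [] := List.length_eq_zero_iff.mp (by omega)
      subst hno; subst hyes
      simp [pvForA, passC]

theorem passC_length : ∀ (sd : List (List (List String))) (cb : List (List String)),
    (passC sd cb).length = sd.length := by
  intro sd
  induction sd with
  | nil => intro cb; simp [passC]
  | cons s ss ih => intro cb; cases cb <;> simp [passC, ih]

theorem passC_getElem? : ∀ (sd : List (List (List String))) (cb : List (List String)) (j : Nat),
    (passC sd cb)[j]? = (sd[j]?).map (fun s => s ++ (cb[j]?).toList) := by
  intro sd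
  induction sd with
  | nil => intro cb j; simp [passC]
  | cons s ss ih =>
    intro cb j
    cases cb with
    | nil => cases j <;> simp [passC]
    | cons x xs => cases j <;> simp [passC, ih]

theorem pvStride_drop (k : Nat) (hk : 1 ≤ k) (cb : List (List String)) (j : Nat) :
    pvStride k (cb.drop j) = (cb[j]?).toList ++ pvStride k (cb.drop (j + k)) := by
  by_cases h : j < cb.length
  · have h1 : cb.drop j = cb[j] :: cb.drop (j + 1) := List.drop_eq_getElem_cons h
    have h2 : (cb.drop (j + 1)).drop (k - 1) = cb.drop (j + k) := by
      rw [List.drop_drop]; congr 1; omega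
    rw [h1, pvStride, h2]
    simp [List.getElem?_eq_getElem h]
  · have h1 : cb.drop j = ([] : List (List String)) := List.drop_eq_nil_of_le (by omega)
    have h2 : cb.drop (j + k) = ([] : List (List String)) := List.drop_eq_nil_of_le (by omega)
    rw [h1, h2]
    simp [pvStride, List.getElem?_eq_none (by omega : cb.length ≤ j)]

theorem pvWhileA_spec : ∀ (fuel : Nat) (sd : List (List (List String))) (no yes : List (List String)),
    (no.reverse ++ yes.reverse).length ≤ fuel →
    (no.reverse ++ yes.reverse ≠ [] → 1 ≤ sd.length) →
    ∀ j : Nat, (pvWhileA fuel sd no yes)[j]?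
      = (sd[j]?).map (fun s => s ++ pvStride sd.length ((no.reverse ++ yes.reverse).drop j)) := by
  intro fuel
  induction fuel with
  | zero =>
    intro sd no yes hfuel _ j
    rw [List.length_append, List.length_reverse, List.length_reverse] at hfuel
    have hno : no = [] := List.length_eq_zero_iff.mp (by omega)
    have hyes : yes = [] := List.length_eq_zero_iff.mp (by omega)
    subst hno; subst hyes
    simp [pvWhileA, pvStride]
  | succ f ih =>
    intro sd no yes hfuel hne j
    by_cases htot : no.length + yes.length > 0
    · have hcne : no.reverse ++ yes.reverse ≠ [] := by
        intro h
        have h0 := congrArg List.length h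
        simp only [List.length_append, List.length_reverse, List.length_nil] at h0
        omega
      have hk : 1 ≤ sd.length := hne hcne
      obtain ⟨hfst, hrest⟩ := pvForA_spec sd no yes
      have hfuel' : ((pvForA sd no yes).2.1.reverse ++ (pvForA sd no yes).2.2.reverse).length ≤ f := by
        rw [hrest, List.length_drop]
        omega
      have ihj := ih (pvForA sd no yes).1 (pvForA sd no yes).2.1 (pvForA sd no yes).2.2
        hfuel' (fun _ => by rw [hfst, passC_length]; exact hk) j
      rw [pvWhileA]
      simp only [htot, if_pos]
      rw [ihj, hfst, passC_length, hrest, passC_getElem?]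
      rw [List.drop_drop]
      rw [pvStride_drop sd.length hk (no.reverse ++ yes.reverse) j]
      cases (sd[j]?) <;> simp [List.append_assoc, Nat.add_comm]
    · have hno : no = [] := List.length_eq_zero_iff.mp (by omega)
      have hyes : yes = [] := List.length_eq_zero_iff.mp (by omega)
      subst hno; subst hyes
      simp [pvWhileA, pvStride]

-- ===== VERDICT =====
theorem SplitnStrat_spec : Claim_equal_SplitnStrat := by
  intro data split _ hpre
  unfold Spec_SplitnStrat SplitnStrat SplitnStrat_alt
  have hpart := pvPartA_spec data [] []
  simp only [List.nil_append] at hpart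
  have hp : pvPartA data = (data.filter (fun v => pvIsNo v), data.filter (fun v => !pvIsNo v)) := hpart
  set noD := data.filter (fun v => pvIsNo v) with hnoD
  set yesD := data.filter (fun v => !pvIsNo v) with hyesD
  set k := split.toNat with hkdef
  have hne : noD.reverse ++ yesD.reverse ≠ [] → 1 ≤ (List.replicate k ([] : List (List String))).length := by
    intro hcne
    have hdata : data ≠ [] := by
      intro h
      subst h
      simp [hnoD, hyesD] at hcne
    have hs := hpre.2 hdata
    simp [hkdef]
    omega
  have hfuel : (noD.reverse ++ yesD.reverse).length ≤ yesD.length + noD.length := by simp; omega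
  apply List.ext_getElem?
  intro j
  rw [hp]
  simp only []
  rw [pvWhileA_spec (yesD.length + noD.length) _ noD yesD hfuel hne j]
  simp only [List.length_replicate, List.getElem?_replicate]
  by_cases hj : j < k
  · simp [hj]
  · simp [hj]
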